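-- pv_equiv track=rewrite | github.com/stvsever/aHFR_TokenSHAP | utils/aHFR_TokenSHAP.py | _epoch_sizes_default
-- ===== SOURCE A (Python) =====
-- from typing import Callable, Dict, List, Optional, Set, Tuple, Any, Union
-- import math
--
-- def _epoch_sizes_default(K: int) -> List[int]:
--     """
--     Split K permutations into multiple epochs.
--     Default heuristic:
--       - number of epochs ~ sqrt(K), capped, at least 2 when K>=2
--       - epoch sizes differ by at most 1
--     """
--     if K <= 1:
--         return [K]
--     n_epochs = int(round(math.sqrt(K)))
--     n_epochs = max(2, min(20, n_epochs))
--     n_epochs = min(n_epochs, K)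
--
--     base = K // n_epochs
--     rem = K % n_epochs
--     sizes = [base + 1] * rem + [base] * (n_epochs - rem)
--     return [s for s in sizes if s > 0]
-- ===== SOURCE B (Python) =====
-- import math
-- from typing import List
--
-- def _epoch_sizes_default(K: int) -> List[int]:
--     if K <= 1:
--         return [K]
--     n_epochs = int(round(math.sqrt(K)))
--     n_epochs = max(2, min(20, n_epochs))
--     n_epochs = min(n_epochs, K)
--
--     sizes = []
--     remaining = K
--     for e in range(n_epochs):
--         size = -(-remaining // (n_epochs - e))  # ceil division: largest chunks first
--         sizes.append(size)
--         remaining -= size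
--     return sizes
-- ===== Notes on version B (the rewrite author's own statement) =====
-- stated objective: alternative
-- what changed: Replaces the closed-form size list (rem copies of base+1 followed by copies of base, then a positivity filter) by a greedy loop that repeatedly takes the ceiling of remaining divided by epochs left and subtracts it.
import Mathlib
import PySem

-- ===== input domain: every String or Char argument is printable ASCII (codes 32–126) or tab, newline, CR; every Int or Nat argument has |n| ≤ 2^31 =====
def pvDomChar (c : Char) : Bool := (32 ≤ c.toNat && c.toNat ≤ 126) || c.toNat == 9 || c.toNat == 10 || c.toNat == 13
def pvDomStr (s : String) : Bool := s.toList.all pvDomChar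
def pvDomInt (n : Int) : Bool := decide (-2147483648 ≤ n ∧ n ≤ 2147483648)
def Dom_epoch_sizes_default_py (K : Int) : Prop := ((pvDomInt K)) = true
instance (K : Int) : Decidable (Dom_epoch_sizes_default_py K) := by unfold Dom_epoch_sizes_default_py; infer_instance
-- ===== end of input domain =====

-- B replaces A's closed-form "[base+1]*rem + [base]*(n-rem)" size list by a greedy
-- ceil-division loop (size = ceil(remaining / epochs_left)); objective: alternative decomposition.

-- Shared helper: int(round(math.sqrt(K))) for 0 ≤ K ≤ 2^31.  Exact on this domain: K is
-- exactly representable as a double, math.sqrt is correctly rounded, and √K is never within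
-- half an ulp of a half-integer for K ≤ 2^31, so round(sqrt(K)) is the nearest integer to √K,
-- i.e. s if K ≤ s²+s else s+1 where s = ⌊√K⌋.
def pyRoundSqrt (K : Int) : Int :=
  let s : Int := (Nat.sqrt K.toNat : Int)
  if K ≤ s * s + s then s else s + 1

-- ===== PORT A =====
def epoch_sizes_default_py (K : Int) : List Int :=
  if K ≤ 1 then [K]
  else
    let n := min (max 2 (min 20 (pyRoundSqrt K))) K
    let base := PySem.Int.floordiv K n
    let rem := PySem.Int.mod K n
    let sizes := List.replicate rem.toNat (base + 1) ++ List.replicate (n - rem).toNat base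
    sizes.filter (fun s => decide (0 < s))

-- ===== PORT B =====
-- the loop "for e in range(n): size = -(-remaining // (n-e)); remaining -= size",
-- transcribed as structural recursion on the number of epochs left (j = n - e)
def greedySizes (j : Nat) (r : Int) : List Int :=
  match j with
  | 0 => []
  | j + 1 =>
    let size := -(PySem.Int.floordiv (-r) ((j : Int) + 1))
    size :: greedySizes j (r - size)

def epoch_sizes_default_py_alt (K : Int) : List Int :=
  if K ≤ 1 then [K]
  else
    let n := min (max 2 (min 20 (pyRoundSqrt K))) K
    greedySizes n.toNat K

-- ===== PRECONDITION & SPEC =====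
def Spec_epoch_sizes_default_py (K : Int) (out : List Int) : Prop := out = epoch_sizes_default_py_alt K
instance (K : Int) (out : List Int) : Decidable (Spec_epoch_sizes_default_py K out) := by unfold Spec_epoch_sizes_default_py; infer_instance

-- ===== CLAIM (what is proved, stated in full; the proofs are below) =====
def Claim_equal_epoch_sizes_default_py : Prop := ∀ (K : Int), Dom_epoch_sizes_default_py K → Spec_epoch_sizes_default_py K (epoch_sizes_default_py K)

-- ===== LEMMAS AND PROOFS =====

-- the greedy loop on r = j*b + t (0 ≤ t < j, 0 ≤ b) produces the "+1 chunks first" list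
theorem greedySizes_eq (j : Nat) : ∀ (b t : Int), 0 ≤ b → 0 ≤ t → t < (j : Int) →
    greedySizes j ((j : Int) * b + t) =
      List.replicate t.toNat (b + 1) ++ List.replicate (j - t.toNat) b := by
  induction j with
  | zero => intro b t _ ht hlt; omega
  | succ j ih =>
    intro b t hb ht hlt
    push_cast at hlt
    by_cases h0 : t = 0
    · subst h0
      have hsize : -(PySem.Int.floordiv (-(((j : Int) + 1) * b + 0)) ((j : Int) + 1)) = b := by
        rw [PySem.Int.neg_floordiv_neg_eq_iff_of_pos (by omega)]
        constructor <;> nlinarith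
      simp only [greedySizes, Nat.cast_add, Nat.cast_one, hsize]
      cases j with
      | zero => simp [greedySizes]
      | succ j' =>
        have harg2 : (((j' + 1 : Nat) : Int) + 1) * b + 0 - b = ((j' + 1 : Nat) : Int) * b + 0 := by
          push_cast; ring
        rw [harg2, ih b 0 hb le_rfl (by positivity)]
        simp [List.replicate_succ]
    · have ht1 : 1 ≤ t := by omega
      have hsize : -(PySem.Int.floordiv (-(((j : Int) + 1) * b + t)) ((j : Int) + 1)) = b + 1 := by
        rw [PySem.Int.neg_floordiv_neg_eq_iff_of_pos (by omega)]
        constructor <;> nlinarith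
      simp only [greedySizes, Nat.cast_add, Nat.cast_one, hsize]
      have harg : ((j : Int) + 1) * b + t - (b + 1) = (j : Int) * b + (t - 1) := by ring
      rw [harg, ih b (t - 1) hb (by omega) (by omega)]
      have htn : t.toNat = (t - 1).toNat + 1 := by omega
      rw [htn]
      simp only [List.replicate_succ, List.cons_append]
      have : j - (t - 1).toNat = j + 1 - ((t - 1).toNat + 1) := by omega
      rw [this]

-- ===== VERDICT (by name: the statement is the Claim_ definition above) =====
theorem epoch_sizes_default_py_spec : Claim_equal_epoch_sizes_default_py := by
  intro K _
  unfold Spec_epoch_sizes_default_py epoch_sizes_default_py epoch_sizes_default_py_alt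
  by_cases hK : K ≤ 1
  · simp [hK]
  · simp only [if_neg hK]
    set n := min (max 2 (min 20 (pyRoundSqrt K))) K with hn
    have hn2 : 2 ≤ n := le_min (le_max_left _ _) (by omega)
    have hnK : n ≤ K := min_le_right _ _
    have hnpos : 0 < n := by omega
    set base := PySem.Int.floordiv K n with hbase
    set rem := PySem.Int.mod K n with hrem
    have hbase1 : 1 ≤ base := by
      rw [hbase, PySem.Int.le_floordiv_iff_mul_le (b := n) (a := K) (q := 1) hnpos]; omega
    have hrem0 : 0 ≤ rem := PySem.Int.mod_nonneg (a := K) hnpos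
    have hremn : rem < n := PySem.Int.mod_lt (a := K) hnpos
    have hKeq : K = n * base + rem := by
      have h := PySem.Int.floordiv_mul_add_mod K n
      rw [← hbase, ← hrem] at h; linarith
    have hcastn : ((n.toNat : Int)) = n := Int.toNat_of_nonneg (by omega)
    have hgreedy : greedySizes n.toNat K =
        List.replicate rem.toNat (base + 1) ++ List.replicate (n.toNat - rem.toNat) base := by
      have : K = (n.toNat : Int) * base + rem := by rw [hcastn]; exact hKeq
      rw [this, greedySizes_eq n.toNat base rem (by omega) hrem0 (by omega)]
    rw [hgreedy]
    have hlen : (n - rem).toNat = n.toNat - rem.toNat := by omega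
    rw [hlen]
    apply List.filter_eq_self.mpr
    intro x hx
    rcases List.mem_append.mp hx with h | h <;>
      · rw [List.eq_of_mem_replicate h]; simp; omega
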